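-- pv_equiv track=rewrite | github.com/bjhtud/MTL_in_MAT | uhpc/class_method.py | _format_combo_name
-- ===== SOURCE A (Python) =====
-- def _format_combo_name(model_name: str, imputer_label: str) -> str:
--     def _slug(text: str) -> str:
--         allowed = []
--         for ch in text:
--             if ch.isalnum():
--                 allowed.append(ch.lower())
--             else:
--                 allowed.append('_')
--         slug = ''.join(allowed)
--         while '__' in slug:
--             slug = slug.replace('__', '_')
--         return slug.strip('_')
--
--     return f'{_slug(model_name)}__{_slug(imputer_label)}'
-- ===== SOURCE B (Python) =====
-- def _format_combo_name(model_name: str, imputer_label: str) -> str: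
--     def _slug(text: str) -> str:
--         tokens = []
--         cur = []
--         for ch in text:
--             if ch.isalnum():
--                 cur.append(ch.lower())
--             elif cur:
--                 tokens.append(''.join(cur))
--                 cur = []
--         if cur:
--             tokens.append(''.join(cur))
--         return '_'.join(tokens)
--
--     return f'{_slug(model_name)}__{_slug(imputer_label)}'
-- ===== Notes on version B (the rewrite author's own statement) =====
-- stated objective: simpler
-- what changed: B slugifies by tokenizing each string into maximal alphanumeric runs in one pass and joining the lowercased runs with '_', replacing A's per-char substitution, replace-'__'-until-fixpoint collapse loop and final strip('_').
import Mathlib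
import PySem

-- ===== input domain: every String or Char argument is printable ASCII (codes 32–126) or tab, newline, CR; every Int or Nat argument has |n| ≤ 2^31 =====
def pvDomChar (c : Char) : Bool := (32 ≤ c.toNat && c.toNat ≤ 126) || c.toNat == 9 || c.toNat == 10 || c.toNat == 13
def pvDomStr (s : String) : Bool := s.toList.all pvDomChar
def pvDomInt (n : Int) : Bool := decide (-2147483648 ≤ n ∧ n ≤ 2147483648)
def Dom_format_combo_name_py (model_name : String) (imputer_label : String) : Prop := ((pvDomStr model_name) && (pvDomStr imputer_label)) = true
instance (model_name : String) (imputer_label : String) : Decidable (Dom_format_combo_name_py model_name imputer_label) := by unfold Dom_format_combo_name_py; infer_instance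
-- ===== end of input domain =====

-- B tokenizes into maximal alphanumeric runs joined by '_' instead of A's substitute / collapse-"__"-until-fixpoint / strip pipeline; objective: simpler (same return value).

-- ===== PORT A =====
-- pvRepl and the lemmas up to pvReplace_lt exist only so that pvCollapse (the port of
-- A's `while '__' in slug:` loop) can cite pvReplace_lt by name in its decreasing_by.
def pvRepl : List Char → List Char
  | [] => []
  | a :: t => if a = '_' ∧ t.head? = some '_' then '_' :: pvRepl t.tail else a :: pvRepl t
termination_by l => l.length
decreasing_by
  · simp only [List.length_cons]; cases t <;> simp
  · simp

theorem pvGo_eq (fuel : Nat) (l acc : List Char) (h : l.length ≤ fuel) :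
    PySem.Chars.replace.go ['_','_'] ['_'] fuel l acc = acc.reverse ++ pvRepl l := by
  induction fuel generalizing l acc with
  | zero =>
    have : l = [] := by cases l <;> simp_all
    subst this; simp [PySem.Chars.replace.go, pvRepl]
  | succ n ih =>
    cases l with
    | nil => simp [PySem.Chars.replace.go, pvRepl]
    | cons c t =>
      rw [PySem.Chars.replace.go]
      by_cases hp : c = '_' ∧ t.head? = some '_'
      · obtain ⟨rfl, ht⟩ := hp
        cases t with
        | nil => simp at ht
        | cons b t' =>
          simp only [List.head?_cons, Option.some.injEq] at ht; subst ht
          rw [if_pos (by simp [List.isPrefixOf])]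
          rw [ih _ _ (by simp at h ⊢; omega)]
          rw [pvRepl]
          simp
      · have hnp : (['_','_'].isPrefixOf (c :: t)) = false := by
          cases t with
          | nil => simp [List.isPrefixOf]
          | cons b t' =>
            rw [Bool.eq_false_iff]
            intro hT
            rcases List.isPrefixOf_iff_prefix.mp hT with ⟨r, hr⟩
            simp at hr
            exact hp ⟨hr.1.symm, by simp [← hr.2.1]⟩
        rw [hnp]
        simp only [Bool.false_eq_true, if_false]
        rw [ih _ _ (by simp at h ⊢; omega)]
        rw [pvRepl]
        rw [if_neg hp]
        simp

theorem pvReplace_eq (s : List Char) :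
    PySem.Chars.replace s ['_','_'] ['_'] = pvRepl s := by
  rw [PySem.Chars.replace]
  simp only [List.isEmpty_cons, Bool.false_eq_true, if_false]
  simpa using pvGo_eq s.length s []

theorem pvRepl_len_le (s : List Char) : (pvRepl s).length ≤ s.length := by
  induction s using pvRepl.induct with
  | case1 => simp [pvRepl]
  | case2 a t h ih =>
    rw [pvRepl, if_pos h]
    obtain ⟨rfl, ht⟩ := h
    cases t with
    | nil => simp at ht
    | cons b tail =>
      simp only [List.tail_cons] at ih
      simp only [List.length_cons]
      simpa using Nat.le_trans ih (by omega)
  | case3 a t h ih =>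
    rw [pvRepl, if_neg h]; simpa using ih

theorem pvRepl_len_lt (s : List Char) (h : ['_','_'] <:+: s) :
    (pvRepl s).length < s.length := by
  induction s using pvRepl.induct with
  | case1 => simp at h
  | case2 a t hc ih =>
    obtain ⟨rfl, ht⟩ := hc
    rw [pvRepl, if_pos ⟨rfl, ht⟩]
    cases t with
    | nil => simp at ht
    | cons b t' =>
      have := pvRepl_len_le t'
      simp; omega
  | case3 a t hc ih =>
    rw [pvRepl, if_neg hc]
    rcases List.infix_cons_iff.mp h with hpre | hinf
    · exfalso
      rcases hpre with ⟨r, hr⟩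
      cases t with
      | nil => simp at hr
      | cons b t' =>
        simp at hr
        exact hc ⟨hr.1.symm, by simp [← hr.2.1]⟩
    · simpa using ih hinf

theorem pvReplace_lt (s : List Char) (h : PySem.Chars.isIn ['_','_'] s = true) :
    (PySem.Chars.replace s ['_','_'] ['_']).length < s.length := by
  rw [pvReplace_eq]
  exact pvRepl_len_lt s ((PySem.Chars.isIn_iff_infix _ _).mp h)

-- the `while '__' in slug: slug = slug.replace('__','_')` loop of A
def pvCollapse (s : List Char) : List Char :=
  if h : PySem.Chars.isIn ['_','_'] s = true then
    pvCollapse (PySem.Chars.replace s ['_','_'] ['_'])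
  else s
termination_by s.length
decreasing_by exact pvReplace_lt s h

-- A's _slug: per-char substitute, collapse '__' until fixpoint, strip '_'
def pvSlugA (text : List Char) : List Char :=
  let allowed := text.map (fun ch => if PySem.Chars.isalnum ch then PySem.Chars.lowerChar ch else '_')
  PySem.Chars.stripChars (pvCollapse allowed) ['_']

def format_combo_name_py (model_name : String) (imputer_label : String) : String :=
  String.mk (pvSlugA model_name.toList ++ '_' :: '_' :: pvSlugA imputer_label.toList)

-- ===== PORT B =====
-- one pass: grow the current alphanumeric run, flush it on a non-alphanumeric char
def pvStepB (st : List (List Char) × List Char) (ch : Char) : List (List Char) × List Char :=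
  if PySem.Chars.isalnum ch then (st.1, st.2 ++ [PySem.Chars.lowerChar ch])
  else if st.2.isEmpty then st
  else (st.1 ++ [st.2], [])

def pvSlugB (text : List Char) : List Char :=
  let st := text.foldl pvStepB ([], [])
  let tokens := if st.2.isEmpty then st.1 else st.1 ++ [st.2]
  PySem.Chars.join ['_'] tokens

def format_combo_name_py_alt (model_name : String) (imputer_label : String) : String :=
  String.mk (pvSlugB model_name.toList ++ '_' :: '_' :: pvSlugB imputer_label.toList)

-- ===== PRECONDITION & SPEC =====
def Spec_format_combo_name_py (model_name : String) (imputer_label : String) (out : String) : Prop := out = format_combo_name_py_alt model_name imputer_label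
instance (model_name : String) (imputer_label : String) (out : String) : Decidable (Spec_format_combo_name_py model_name imputer_label out) := by unfold Spec_format_combo_name_py; infer_instance

-- ===== CLAIM (what is proved, stated in full; the proofs are below) =====
def Claim_equal_format_combo_name_py : Prop := ∀ (model_name : String) (imputer_label : String), Dom_format_combo_name_py model_name imputer_label → Spec_format_combo_name_py model_name imputer_label (format_combo_name_py model_name imputer_label)

-- ===== LEMMAS AND PROOFS =====

-- character predicate behind strip('_')
def pvU (c : Char) : Bool := (['_'] : List Char).contains c

theorem pvU_true : pvU '_' = true := rfl

theorem pvU_false (c : Char) (h : c ≠ '_') : pvU c = false := by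
  unfold pvU
  rw [List.contains_cons]
  simp [h]

def pvLstrip (s : List Char) : List Char := s.dropWhile pvU
def pvRstrip (s : List Char) : List Char := (s.reverse.dropWhile pvU).reverse

theorem pvStripChars_eq (s : List Char) :
    PySem.Chars.stripChars s ['_'] = pvRstrip (pvLstrip s) := rfl

-- squeeze: collapse every run of '_' to a single '_' (the fixpoint of A's while loop)
def pvSqueeze : List Char → List Char
  | [] => []
  | a :: t => if a = '_' ∧ t.head? = some '_' then pvSqueeze t else a :: pvSqueeze t

-- maximal non-'_' runs of a classified string, with current run `cur`
def pvRuns : List Char → List Char → List (List Char)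
  | [], cur => if cur.isEmpty then [] else [cur]
  | c :: t, cur =>
    if c = '_' then (if cur.isEmpty then pvRuns t [] else cur :: pvRuns t [])
    else pvRuns t (cur ++ [c])

-- B's loop as a recursion over the raw text
def pvBruns : List Char → List Char → List (List Char)
  | [], cur => if cur.isEmpty then [] else [cur]
  | ch :: t, cur =>
    if PySem.Chars.isalnum ch then pvBruns t (cur ++ [PySem.Chars.lowerChar ch])
    else if cur.isEmpty then pvBruns t []
    else cur :: pvBruns t []

theorem pvHead?_repl (t : List Char) : (pvRepl t).head? = t.head? := by
  cases t with
  | nil => simp [pvRepl]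
  | cons a t =>
    rw [pvRepl]
    by_cases h : a = '_' ∧ t.head? = some '_'
    · rw [if_pos h]; simp [h.1]
    · rw [if_neg h]; simp

theorem pvSqueeze_repl (s : List Char) : pvSqueeze (pvRepl s) = pvSqueeze s := by
  induction s using pvRepl.induct with
  | case1 => simp [pvRepl]
  | case2 a t h ih =>
    obtain ⟨rfl, ht⟩ := h
    cases t with
    | nil => simp at ht
    | cons b t' =>
      simp only [List.head?_cons, Option.some.injEq] at ht; subst ht
      rw [pvRepl, if_pos ⟨rfl, by simp⟩]
      simp only [List.tail_cons] at ih ⊢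
      rw [show pvSqueeze ('_' :: '_' :: t') = pvSqueeze ('_' :: t') from by
        rw [pvSqueeze, if_pos ⟨rfl, by simp⟩]]
      cases hh : t'.head? with
      | some e =>
        by_cases he : e = '_'
        · subst he
          rw [show pvSqueeze ('_' :: pvRepl t') = pvSqueeze (pvRepl t') from by
            rw [pvSqueeze, if_pos ⟨rfl, by rw [pvHead?_repl, hh]⟩]]
          rw [show pvSqueeze ('_' :: t') = pvSqueeze t' from by
            rw [pvSqueeze, if_pos ⟨rfl, hh⟩]]
          exact ih
        · rw [show pvSqueeze ('_' :: pvRepl t') = '_' :: pvSqueeze (pvRepl t') from by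
            rw [pvSqueeze, if_neg (by rw [pvHead?_repl, hh]; rintro ⟨-, hx⟩; exact he (by simpa using hx))]]
          rw [show pvSqueeze ('_' :: t') = '_' :: pvSqueeze t' from by
            rw [pvSqueeze, if_neg (by rw [hh]; rintro ⟨-, hx⟩; exact he (by simpa using hx))]]
          rw [ih]
      | none =>
        rw [show pvSqueeze ('_' :: pvRepl t') = '_' :: pvSqueeze (pvRepl t') from by
          rw [pvSqueeze, if_neg (by rw [pvHead?_repl, hh]; rintro ⟨-, hx⟩; cases hx)]]
        rw [show pvSqueeze ('_' :: t') = '_' :: pvSqueeze t' from by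
          rw [pvSqueeze, if_neg (by rw [hh]; rintro ⟨-, hx⟩; cases hx)]]
        rw [ih]
  | case3 a t h ih =>
    rw [pvRepl, if_neg h]
    rw [pvSqueeze, pvSqueeze, if_neg (by rw [pvHead?_repl]; exact h), if_neg h, ih]

theorem pvSqueeze_of_no_dd (s : List Char) (h : ¬ ['_','_'] <:+: s) : pvSqueeze s = s := by
  induction s with
  | nil => rfl
  | cons a t ih =>
    rw [pvSqueeze]
    rw [if_neg ?_, ih ?_]
    · intro hinf
      exact h (List.infix_cons_iff.mpr (Or.inr hinf))
    · rintro ⟨rfl, ht⟩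
      cases t with
      | nil => simp at ht
      | cons b t' =>
        simp only [List.head?_cons, Option.some.injEq] at ht; subst ht
        exact h (List.infix_cons_iff.mpr (Or.inl ⟨t', rfl⟩))

theorem pvCollapse_eq_squeeze (s : List Char) : pvCollapse s = pvSqueeze s := by
  induction s using pvCollapse.induct with
  | case1 s h ih =>
    rw [pvCollapse, dif_pos h, ih, pvReplace_eq, pvSqueeze_repl]
  | case2 s h =>
    rw [pvCollapse, dif_neg h]
    rw [pvSqueeze_of_no_dd s ((PySem.Chars.isIn_eq_false_iff _ _).mp (by simpa using h))]

theorem pvSqueeze_underscore (t : List Char) :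
    pvSqueeze ('_' :: t) = '_' :: pvSqueeze (t.dropWhile (· = '_')) := by
  induction t with
  | nil => rw [pvSqueeze]; simp [pvSqueeze]
  | cons b t' ih =>
    by_cases hb : b = '_'
    · subst hb
      rw [show pvSqueeze ('_' :: '_' :: t') = pvSqueeze ('_' :: t') from by
        rw [pvSqueeze, if_pos ⟨rfl, by simp⟩]]
      rw [ih]
      simp
    · rw [pvSqueeze, if_neg (by rintro ⟨-, hx⟩; exact hb (by simpa using hx))]
      rw [List.dropWhile_cons]
      simp [hb]

theorem pvRuns_dropWhile (t : List Char) :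
    pvRuns (t.dropWhile (· = '_')) [] = pvRuns t [] := by
  induction t with
  | nil => rfl
  | cons a t ih =>
    by_cases ha : a = '_'
    · subst ha
      rw [List.dropWhile_cons]
      simp only [decide_true, if_true]
      rw [ih, pvRuns, if_pos rfl]
      simp
    · rw [List.dropWhile_cons]
      simp [ha]

theorem pvRuns_ne_nil (t : List Char) (cur : List Char) (h : cur ≠ []) :
    pvRuns t cur ≠ [] := by
  induction t generalizing cur with
  | nil => simp [pvRuns, h]
  | cons c t ih =>
    rw [pvRuns]
    by_cases hc : c = '_'
    · rw [if_pos hc, if_neg (by simpa using h)]; simp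
    · rw [if_neg hc]; exact ih _ (by simp)

theorem pvRstrip_cons_ne (c : Char) (x : List Char) (hc : c ≠ '_') :
    pvRstrip (c :: x) = c :: pvRstrip x := by
  unfold pvRstrip
  rw [List.reverse_cons, List.dropWhile_append]
  by_cases he : (x.reverse.dropWhile pvU).isEmpty = true
  · rw [if_pos he]
    rw [List.isEmpty_iff] at he
    rw [he]
    simp [List.dropWhile, pvU_false c hc]
  · rw [if_neg he]
    simp

theorem pvRstrip_cons_of_ne_nil (a : Char) (x : List Char) (h : pvRstrip x ≠ []) :
    pvRstrip (a :: x) = a :: pvRstrip x := by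
  unfold pvRstrip at h ⊢
  rw [List.reverse_cons, List.dropWhile_append]
  rw [if_neg (by simpa [List.isEmpty_iff] using h)]
  simp

theorem pvDropWhile_head_false {p : Char → Bool} {l : List Char} {c : Char} {d : List Char}
    (h : l.dropWhile p = c :: d) : p c = false := by
  induction l with
  | nil => simp at h
  | cons a t ih =>
    rw [List.dropWhile_cons] at h
    by_cases hp : p a = true
    · rw [if_pos hp] at h; exact ih h
    · rw [if_neg hp] at h
      cases h
      simpa using hp

theorem pvN (n : Nat) : ∀ (t cur : List Char), t.length ≤ n → cur ≠ [] →
    List.intercalate ['_'] (pvRuns t cur) = cur ++ pvRstrip (pvSqueeze t) := by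
  induction n with
  | zero =>
    intro t cur ht hc
    have : t = [] := by cases t <;> simp_all
    subst this
    simp [pvRuns, pvSqueeze, pvRstrip, List.intercalate, List.intersperse, hc]
  | succ n ih =>
    intro t cur ht hc
    cases t with
    | nil => simp [pvRuns, pvSqueeze, pvRstrip, List.intercalate, List.intersperse, hc]
    | cons c t' =>
      by_cases hcu : c = '_'
      · subst hcu
        rw [pvRuns, if_pos rfl, if_neg (by simpa using hc)]
        rw [pvSqueeze_underscore]
        rw [← pvRuns_dropWhile t']
        cases hdc : t'.dropWhile (· = '_') with
        | nil =>
          simp [pvRuns, pvSqueeze, pvRstrip, List.intercalate, List.intersperse,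
            List.dropWhile, pvU_true]
        | cons e d' =>
          have he : e ≠ '_' := by
            have := pvDropWhile_head_false hdc
            simpa using this
          rw [pvRuns, if_neg he]
          rw [show pvSqueeze (e :: d') = e :: pvSqueeze d' from by
            rw [pvSqueeze, if_neg (by rintro ⟨h1, -⟩; exact he h1)]]
          have hne : pvRuns d' ([] ++ [e]) ≠ [] := pvRuns_ne_nil _ _ (by simp)
          cases hrr : pvRuns d' ([] ++ [e]) with
          | nil => exact absurd hrr hne
          | cons r rs =>
            have hstep : List.intercalate ['_'] (cur :: r :: rs)
                = cur ++ '_' :: List.intercalate ['_'] (r :: rs) := by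
              simp [List.intercalate, List.intersperse]
            rw [hstep]
            have hlen : d'.length ≤ n := by
              have h1 := List.length_dropWhile_le (fun x => decide (x = '_')) t'
              rw [hdc] at h1
              simp at h1 ht
              omega
            have hih := ih d' ([] ++ [e]) hlen (by simp)
            rw [hrr] at hih
            rw [pvRstrip_cons_of_ne_nil _ _ (by rw [pvRstrip_cons_ne _ _ he]; simp)]
            rw [pvRstrip_cons_ne _ _ he]
            rw [hih]
            simp
      · rw [pvRuns, if_neg hcu]
        rw [show pvSqueeze (c :: t') = c :: pvSqueeze t' from by
          rw [pvSqueeze, if_neg (by rintro ⟨h1, -⟩; exact hcu h1)]]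
        rw [pvRstrip_cons_ne _ _ hcu]
        rw [ih t' (cur ++ [c]) (by simpa using ht) (by simp)]
        simp

theorem pvM (n : Nat) : ∀ (m : List Char), m.length ≤ n →
    pvRstrip (pvLstrip (pvSqueeze m)) = List.intercalate ['_'] (pvRuns m []) := by
  induction n with
  | zero =>
    intro m hm
    have : m = [] := by cases m <;> simp_all
    subst this
    simp [pvRuns, pvSqueeze, pvLstrip, pvRstrip, List.intercalate, List.intersperse]
  | succ n ih =>
    intro m hm
    cases m with
    | nil => simp [pvRuns, pvSqueeze, pvLstrip, pvRstrip, List.intercalate, List.intersperse]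
    | cons c t =>
      by_cases hcu : c = '_'
      · subst hcu
        rw [pvSqueeze_underscore]
        rw [pvRuns, if_pos rfl]
        simp only [List.isEmpty_nil, if_true]
        rw [← pvRuns_dropWhile t]
        unfold pvLstrip
        rw [List.dropWhile_cons]
        rw [if_pos pvU_true]
        have hlen : (t.dropWhile (· = '_')).length ≤ n := by
          have := List.length_dropWhile_le (fun x => decide (x = '_')) t
          simp at hm this
          omega
        exact ih _ hlen
      · rw [show pvSqueeze (c :: t) = c :: pvSqueeze t from by
          rw [pvSqueeze, if_neg (by rintro ⟨h1, -⟩; exact hcu h1)]]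
        unfold pvLstrip
        rw [List.dropWhile_cons, if_neg (by simp [pvU_false c hcu])]
        rw [pvRstrip_cons_ne _ _ hcu]
        rw [pvRuns, if_neg hcu]
        rw [pvN n t ([] ++ [c]) (by simpa using hm) (by simp)]
        simp

theorem pvLower_ne_underscore (c : Char) (h : PySem.Chars.isalnum c = true) :
    PySem.Chars.lowerChar c ≠ '_' := by
  rw [PySem.Chars.lowerChar]
  by_cases hu : PySem.Chars.isupper c = true
  · rw [if_pos hu]
    have hb : 65 ≤ c.toNat ∧ c.toNat ≤ 90 := by
      simpa [PySem.Chars.isupper, Char.le_def, UInt32.le_iff_toNat_le] using hu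
    intro heq
    have h2 := congrArg Char.toNat heq
    rw [Char.toNat_ofNat] at h2
    rw [if_pos (Or.inl (by omega))] at h2
    have h95 : ('_' : Char).toNat = 95 := rfl
    omega
  · rw [if_neg hu]
    intro heq
    subst heq
    simp [PySem.Chars.isalnum, PySem.Chars.isalpha, PySem.Chars.isdigit,
          PySem.Chars.isupper, PySem.Chars.islower, Char.le_def] at h

theorem pvBruns_eq_runs (text : List Char) : ∀ cur,
    pvRuns (text.map (fun ch => if PySem.Chars.isalnum ch then PySem.Chars.lowerChar ch else '_')) cur
      = pvBruns text cur := by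
  induction text with
  | nil => intro cur; rfl
  | cons ch t ih =>
    intro cur
    simp only [List.map_cons]
    by_cases ha : PySem.Chars.isalnum ch = true
    · rw [if_pos ha, pvRuns, if_neg (pvLower_ne_underscore ch ha), ih]
      rw [pvBruns, if_pos ha]
    · rw [if_neg ha, pvRuns, if_pos rfl, pvBruns, if_neg ha]
      by_cases hc : cur.isEmpty = true
      · rw [if_pos hc, if_pos hc, ih]
      · rw [if_neg hc, if_neg hc, ih]

theorem pvFoldB (text : List Char) : ∀ (tokens : List (List Char)) (cur : List Char),
    (let st := text.foldl pvStepB (tokens, cur)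
     if st.2.isEmpty then st.1 else st.1 ++ [st.2]) = tokens ++ pvBruns text cur := by
  induction text with
  | nil =>
    intro tokens cur
    simp only [List.foldl_nil, pvBruns]
    by_cases hc : cur.isEmpty = true
    · rw [if_pos hc, if_pos hc]; simp
    · rw [if_neg hc, if_neg hc]
  | cons ch t ih =>
    intro tokens cur
    simp only [List.foldl_cons]
    rw [pvBruns]
    by_cases ha : PySem.Chars.isalnum ch = true
    · rw [show pvStepB (tokens, cur) ch = (tokens, cur ++ [PySem.Chars.lowerChar ch]) from by
        simp [pvStepB, ha]]
      rw [if_pos ha]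
      exact ih tokens (cur ++ [PySem.Chars.lowerChar ch])
    · rw [if_neg ha]
      by_cases hc : cur.isEmpty = true
      · rw [show pvStepB (tokens, cur) ch = (tokens, cur) from by simp [pvStepB, ha, hc]]
        rw [if_pos hc]
        have hcur : cur = [] := List.isEmpty_iff.mp hc
        subst hcur
        exact ih tokens []
      · rw [show pvStepB (tokens, cur) ch = (tokens ++ [cur], []) from by simp [pvStepB, ha, hc]]
        rw [if_neg hc]
        rw [ih (tokens ++ [cur]) []]
        simp

theorem pvSlug_eq (text : List Char) : pvSlugA text = pvSlugB text := by
  unfold pvSlugA pvSlugB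
  rw [pvStripChars_eq, pvCollapse_eq_squeeze]
  rw [pvM (text.map (fun ch => if PySem.Chars.isalnum ch then PySem.Chars.lowerChar ch else '_')).length _ le_rfl]
  rw [pvBruns_eq_runs]
  have hf := pvFoldB text [] []
  simp only [List.nil_append] at hf
  rw [PySem.Chars.join]
  rw [hf]

-- ===== VERDICT (by name: the statement is the Claim_ definition above) =====
theorem format_combo_name_py_spec : Claim_equal_format_combo_name_py := by
  intro model_name imputer_label _
  unfold Spec_format_combo_name_py format_combo_name_py format_combo_name_py_alt
  simp only [pvSlug_eq]
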